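-- pv_equiv track=rewrite | github.com/Yauheni-Aliakseyenka/Codewars | Fundamentals/Once upon a time, on a way through the old wild mountainous west.py | dirReduc1
-- ===== SOURCE A (Python) =====
-- opposite = {'NORTH': 'SOUTH', 'EAST': 'WEST', 'SOUTH': 'NORTH', 'WEST': 'EAST'}
--
-- def dirReduc1(plan):
--     new_plan = []
--     for d in plan:
--         if new_plan and new_plan[-1] == opposite[d]:
--             new_plan.pop()
--         else:
--             new_plan.append(d)
--     return new_plan
-- ===== SOURCE B (Python) =====
-- opposite = {'NORTH': 'SOUTH', 'EAST': 'WEST', 'SOUTH': 'NORTH', 'WEST': 'EAST'}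
--
-- def dirReduc1(plan):
--     lst = list(plan)
--     changed = True
--     while changed:
--         changed = False
--         for i in range(len(lst) - 1):
--             if opposite[lst[i]] == lst[i + 1]:
--                 del lst[i:i + 2]
--                 changed = True
--                 break
--     return lst
-- ===== Notes on version B (the rewrite author's own statement) =====
-- stated objective: alternative
-- what changed: Replaces the single-pass stack (push/pop on new_plan) by a fixed-point repeated scan that deletes the first adjacent opposite pair and restarts until no pair remains; equal by confluence of adjacent-pair cancellation.
-- outside the precondition, e.g. on dirReduc1(['FOO', 'NORTH', 'SOUTH']): A returns ['FOO'], B raises KeyError; on dirReduc1(['NORTH', 'SOUTH', 'FOO']): A returns ['FOO'], B returns ['FOO']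
import Mathlib
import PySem

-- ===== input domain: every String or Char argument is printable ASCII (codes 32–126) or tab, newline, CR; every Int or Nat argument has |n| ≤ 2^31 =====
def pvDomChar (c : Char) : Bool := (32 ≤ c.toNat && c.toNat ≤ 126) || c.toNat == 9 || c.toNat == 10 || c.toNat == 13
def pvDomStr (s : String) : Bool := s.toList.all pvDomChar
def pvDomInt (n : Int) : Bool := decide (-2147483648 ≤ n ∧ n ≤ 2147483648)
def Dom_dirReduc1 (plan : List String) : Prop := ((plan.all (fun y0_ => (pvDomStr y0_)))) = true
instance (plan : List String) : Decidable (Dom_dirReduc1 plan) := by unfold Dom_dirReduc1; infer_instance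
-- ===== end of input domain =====

-- B is an alternative algorithm (fixed-point repeated scan), not claimed faster.
-- Neither program mutates its argument's caller-visible state (B copies the list first).

-- ===== PORT A =====
-- the module-level dict `opposite`
def oppositeDict : PySem.Dict String String :=
  PySem.Dict.mk [("NORTH", "SOUTH"), ("EAST", "WEST"), ("SOUTH", "NORTH"), ("WEST", "EAST")]

-- `opposite[d]`; in Python a missing key raises KeyError — those inputs are excluded by Pre_
def opp (d : String) : String := PySem.Dict.getD oppositeDict d ""

-- one iteration of A's for-loop body; new_plan is kept reversed, so Python's
-- new_plan[-1] / .pop() / .append(d) are head / tail / cons here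
def stepA (acc : List String) (d : String) : List String :=
  match acc with
  | h :: t => if h = opp d then t else d :: h :: t
  | [] => [d]

def dirReduc1 (plan : List String) : List String :=
  (plan.foldl stepA []).reverse

-- ===== PORT B =====
-- B's inner for-loop with break: delete the first adjacent opposite pair,
-- `none` when a full scan finds no pair (then `changed` stays False)
def findCancel : List String → Option (List String)
  | a :: b :: t => if opp a = b then some t else (findCancel (b :: t)).map (a :: ·)
  | _ => none

theorem findCancel_length : ∀ (l l' : List String), findCancel l = some l' → l'.length < l.length := by
  intro l
  induction l with
  | nil => intro l' h; simp [findCancel] at h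
  | cons a t ih =>
    intro l' h
    cases t with
    | nil => simp [findCancel] at h
    | cons b t' =>
      simp only [findCancel] at h
      split at h
      · cases h; simp
      · rcases Option.map_eq_some_iff.mp h with ⟨l'', h1, h2⟩
        subst h2
        have := ih l'' h1
        simp at this ⊢
        omega

-- B's while-loop: repeat until a full scan changes nothing
def bLoop (l : List String) : List String :=
  match h : findCancel l with
  | some l' => bLoop l'
  | none => l
termination_by l.length
decreasing_by exact findCancel_length l l' h

def dirReduc1_alt (plan : List String) : List String := bLoop plan

-- ===== PRECONDITION & SPEC =====
-- Pre_ admits the function's natural domain (lists of the four compass directions) plus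
-- lists of length ≤ 1, where no opposite[] lookup is ever evaluated by either program:
-- on longer lists containing other strings A raises KeyError except when the empty-stack
-- short-circuit skips the lookup (then A keeps the stray string), an accident of
-- evaluation order, and B raises KeyError whenever its scan reaches the stray string.
def Pre_dirReduc1 (plan : List String) : Prop :=
  (∀ s ∈ plan, s = "NORTH" ∨ s = "SOUTH" ∨ s = "EAST" ∨ s = "WEST") ∨ plan.length ≤ 1
instance (plan : List String) : Decidable (Pre_dirReduc1 plan) := by unfold Pre_dirReduc1; infer_instance

def pvWitness_dirReduc1 : List String := ["NORTH", "SOUTH", "EAST"]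

def Spec_dirReduc1 (plan : List String) (out : List String) : Prop := out = dirReduc1_alt plan
instance (plan : List String) (out : List String) : Decidable (Spec_dirReduc1 plan out) := by unfold Spec_dirReduc1; infer_instance

-- ===== CLAIM (what is proved, stated in full; the proofs are below) =====
def Claim_equal_dirReduc1 : Prop := ∀ (plan : List String), Dom_dirReduc1 plan → Pre_dirReduc1 plan → Spec_dirReduc1 plan (dirReduc1 plan)

-- ===== LEMMAS AND PROOFS =====

def IsDir (s : String) : Prop := s = "NORTH" ∨ s = "SOUTH" ∨ s = "EAST" ∨ s = "WEST"

theorem opp_opp {a : String} (h : IsDir a) : opp (opp a) = a := by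
  rcases h with h | h | h | h <;> subst h <;> simp [opp, oppositeDict, PySem.Dict.getD, PySem.Dict.get?_mk_cons]

-- the stack invariant: no element sits directly on top of its opposite
def StackInv : List String → Prop
  | x :: y :: t => y ≠ opp x ∧ StackInv (y :: t)
  | _ => True

theorem stackInv_tail : ∀ {l : List String}, StackInv l → StackInv l.tail
  | [], _ => trivial
  | [_], _ => trivial
  | _ :: _ :: _, h => h.2

theorem inv_step {acc : List String} {d : String} (h : StackInv acc) : StackInv (stepA acc d) := by
  cases acc with
  | nil => simp [stepA, StackInv]
  | cons x t =>
    simp only [stepA]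
    split
    · exact stackInv_tail h
    · exact ⟨by assumption, h⟩

theorem step_cancel {acc : List String} {a : String} (hinv : StackInv acc) (ha : IsDir a) :
    stepA (stepA acc a) (opp a) = acc := by
  cases acc with
  | nil => simp [stepA, opp_opp ha]
  | cons h t =>
    by_cases hc : h = opp a
    · subst hc
      simp only [stepA, if_pos]
      cases t with
      | nil => simp
      | cons y t' =>
        have hy : y ≠ opp (opp a) := hinv.1
        simp [hy]
    · simp [stepA, hc, opp_opp ha]

theorem fold_cancel : ∀ (l : List String) (acc l' : List String),
    (∀ s ∈ l, IsDir s) → StackInv acc → findCancel l = some l' →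
    List.foldl stepA acc l = List.foldl stepA acc l' := by
  intro l
  induction l with
  | nil => intro acc l' _ _ h; simp [findCancel] at h
  | cons a t ih =>
    intro acc l' hd hinv h
    cases t with
    | nil => simp [findCancel] at h
    | cons b t' =>
      simp only [findCancel] at h
      split at h
      · -- opp a = b : delete the pair
        rename_i heq
        cases h
        have ha : IsDir a := hd a (by simp)
        simp only [List.foldl_cons]
        rw [← heq, step_cancel hinv ha]
      · rcases Option.map_eq_some_iff.mp h with ⟨l'', h1, h2⟩
        subst h2
        have hd' : ∀ s ∈ b :: t', IsDir s := fun s hs => hd s (by simp [hs])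
        have hih := ih (stepA acc a) l'' hd' (inv_step hinv) h1
        simpa only [List.foldl_cons] using hih

theorem fold_none : ∀ (l : List String) (acc : List String),
    findCancel l = none → (∀ s ∈ l, IsDir s) →
    (∀ x h, l.head? = some x → acc.head? = some h → h ≠ opp x) →
    List.foldl stepA acc l = l.reverse ++ acc := by
  intro l
  induction l with
  | nil => intro acc _ _ _; simp
  | cons a t ih =>
    intro acc hn hd hh
    have hstep : stepA acc a = a :: acc := by
      cases acc with
      | nil => simp [stepA]
      | cons h t'' =>
        have : h ≠ opp a := hh a h rfl rfl
        simp [stepA, this]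
    have ha : IsDir a := hd a (by simp)
    have hd' : ∀ s ∈ t, IsDir s := fun s hs => hd s (by simp [hs])
    cases t with
    | nil => simp [hstep]
    | cons b t' =>
      simp only [findCancel] at hn
      split at hn
      · simp at hn
      · have hn' : findCancel (b :: t') = none := by
          cases hfc : findCancel (b :: t') with
          | none => rfl
          | some l'' => rw [hfc] at hn; simp at hn
        have hb : IsDir b := hd' b (by simp)
        have hab : opp a ≠ b := by assumption
        have hhh : ∀ x h, (b :: t').head? = some x → (a :: acc).head? = some h → h ≠ opp x := by
          intro x h hx hah
          simp at hx hah
          subst hx; subst hah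
          intro hcontra
          exact hab (by rw [hcontra, opp_opp hb])
        simp only [List.foldl_cons] at *
        rw [hstep]
        rw [ih (a :: acc) hn' hd' hhh]
        simp

theorem findCancel_sub : ∀ (l l' : List String), findCancel l = some l' → ∀ s ∈ l', s ∈ l := by
  intro l
  induction l with
  | nil => intro l' h; simp [findCancel] at h
  | cons a t ih =>
    intro l' h s hs
    cases t with
    | nil => simp [findCancel] at h
    | cons b t' =>
      simp only [findCancel] at h
      split at h
      · cases h; simp [hs]
      · rcases Option.map_eq_some_iff.mp h with ⟨l'', h1, h2⟩
        subst h2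
        cases hs with
        | head => simp
        | tail _ hs' => have := ih l'' h1 s hs'; simp [this]

theorem bLoop_props : ∀ (n : ℕ) (l : List String), l.length ≤ n → (∀ s ∈ l, IsDir s) →
    List.foldl stepA [] l = List.foldl stepA [] (bLoop l) ∧
    findCancel (bLoop l) = none ∧ (∀ s ∈ bLoop l, IsDir s) := by
  intro n
  induction n with
  | zero =>
    intro l hl hd
    have : l = [] := List.length_eq_zero_iff.mp (Nat.le_zero.mp hl)
    subst this
    refine ⟨?_, ?_, ?_⟩ <;> simp [bLoop, findCancel]
  | succ n ih =>
    intro l hl hd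
    rw [bLoop]
    cases hfc : findCancel l with
    | none => exact ⟨rfl, hfc, hd⟩
    | some l' =>
      have hlen := findCancel_length l l' hfc
      have hd' : ∀ s ∈ l', IsDir s := fun s hs => hd s (findCancel_sub l l' hfc s hs)
      have := ih l' (by omega) hd'
      refine ⟨?_, this.2.1, this.2.2⟩
      rw [fold_cancel l [] l' hd (by simp [StackInv]) hfc]
      exact this.1

-- ===== VERDICT (by name: the statement is the Claim_ definition above) =====
theorem dirReduc1_spec : Claim_equal_dirReduc1 := by
  intro plan _ hpre
  unfold Spec_dirReduc1 dirReduc1 dirReduc1_alt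
  rcases hpre with hpre | hlen
  case inr =>
    -- length ≤ 1: neither program ever evaluates a lookup; both return the list unchanged
    match plan, hlen with
    | [], _ => rw [bLoop]; simp [findCancel]
    | [x], _ => rw [bLoop]; simp [findCancel, stepA]
  have hd : ∀ s ∈ plan, IsDir s := hpre
  obtain ⟨h1, h2, h3⟩ := bLoop_props plan.length plan le_rfl hd
  rw [h1, fold_none (bLoop plan) [] h2 h3 (by intro x h _ hah; simp at hah)]
  simp
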